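-- pv_equiv track=rewrite | github.com/231771725wang-cpu/style-compass | scripts/build_style_prompt.py | select_prompt_examples
-- ===== SOURCE A (Python) =====
-- def dedupe(items: list[str]) -> list[str]:
--     seen: set[str] = set()
--     ordered: list[str] = []
--     for item in items:
--         value = str(item).strip()
--         if not value:
--             continue
--         marker = value.lower()
--         if marker in seen:
--             continue
--         seen.add(marker)
--         ordered.append(value)
--     return ordered
--
-- def select_prompt_examples(examples: dict[str, str], profile: dict, fallback_limit: int = 3) -> dict[str, str]:
--     preferred = dedupe(list(profile.get("page_types", [])) + list(profile.get("existing_pages", [])))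
--     ordered: list[tuple[str, str]] = []
--     seen: set[str] = set()
--     for key in preferred:
--         if key in examples:
--             ordered.append((key, examples[key]))
--             seen.add(key)
--     for key, value in examples.items():
--         if key in seen:
--             continue
--         ordered.append((key, value))
--     return dict(ordered[:fallback_limit])
-- ===== SOURCE B (Python) =====
-- def dedupe(items: list[str]) -> list[str]:
--     seen: set[str] = set()
--     ordered: list[str] = []
--     for item in items:
--         value = str(item).strip()
--         if not value:
--             continue
--         marker = value.lower()
--         if marker in seen:
--             continue
--         seen.add(marker)
--         ordered.append(value)
--     return ordered
--
-- def select_prompt_examples(examples: dict[str, str], profile: dict, fallback_limit: int = 3) -> dict[str, str]: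
--     # Bucket the example items by the rank of their key in the preferred list
--     # (rank = position; non-preferred keys share the sentinel bucket at the end),
--     # then concatenate the buckets in rank order and truncate.
--     preferred = dedupe(list(profile.get("page_types", [])) + list(profile.get("existing_pages", [])))
--     n = len(preferred)
--     rank = {key: i for i, key in enumerate(preferred)}
--     tagged = [(rank.get(key, n), (key, value)) for key, value in examples.items()]
--     buckets: dict[int, list[tuple[str, str]]] = {}
--     for r, pair in tagged:
--         buckets.setdefault(r, []).append(pair)
--     ordered = [pair for i in range(n + 1) for pair in buckets.get(i, [])]
--     return dict(ordered[:fallback_limit])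
-- ===== Notes on version B (the rewrite author's own statement) =====
-- stated objective: alternative
-- what changed: A scans the preferred keys against the dict while accumulating a 'seen' set and then re-scans the dict skipping seen keys; B instead builds a rank table from the preferred list, distributes the dict items into rank buckets in one pass (non-preferred keys share the sentinel bucket), and concatenates the buckets in rank order.
import Mathlib
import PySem

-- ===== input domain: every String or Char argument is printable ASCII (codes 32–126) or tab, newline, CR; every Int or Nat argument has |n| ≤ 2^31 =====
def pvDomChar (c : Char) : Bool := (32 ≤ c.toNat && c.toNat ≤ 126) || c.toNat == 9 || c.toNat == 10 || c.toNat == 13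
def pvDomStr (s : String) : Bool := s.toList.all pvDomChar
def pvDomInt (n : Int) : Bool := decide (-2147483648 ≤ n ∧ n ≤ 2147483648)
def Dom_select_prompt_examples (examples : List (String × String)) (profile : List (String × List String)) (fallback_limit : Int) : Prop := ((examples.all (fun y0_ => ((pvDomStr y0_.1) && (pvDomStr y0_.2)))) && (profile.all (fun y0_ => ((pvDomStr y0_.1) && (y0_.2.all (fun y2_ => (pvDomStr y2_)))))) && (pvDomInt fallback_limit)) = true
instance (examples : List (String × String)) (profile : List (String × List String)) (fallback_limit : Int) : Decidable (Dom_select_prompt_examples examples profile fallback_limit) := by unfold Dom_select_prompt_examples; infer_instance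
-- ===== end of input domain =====

-- B replaces A's two scans (preferred scan with a `seen` set, then a skip scan over
-- the dict) by a bucket/counting-sort pass: rank table, one distribution pass, one
-- concatenation of buckets; objective: alternative decomposition, same result.

-- ===== PORT A =====
-- shared helper (identical Python helper `dedupe` in Source A and Source B)
def dedupe (items : List String) : List String :=
  (items.foldl (fun acc item =>
      let value := PySem.Str.strip item
      if value = "" then acc
      else
        let marker := PySem.Str.lower value
        if PySem.Set.contains acc.1 marker then acc
        else (PySem.Set.add acc.1 marker, acc.2 ++ [value]))
    ((PySem.Set.empty : PySem.Set String), ([] : List String))).2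

def select_prompt_examples (examples : List (String × String)) (profile : List (String × List String)) (fallback_limit : Int) : List (String × String) :=
  let prof := PySem.Dict.mk profile
  let d := PySem.Dict.mk examples
  let preferred := dedupe (prof.getD "page_types" [] ++ prof.getD "existing_pages" [])
  -- first loop: preferred keys present in examples, recording them in `seen`
  let st := preferred.foldl
    (fun (acc : List (String × String) × PySem.Set String) key =>
      if d.contains key then (acc.1 ++ [(key, d.getD key "")], acc.2.add key) else acc)
    (([] : List (String × String)), (PySem.Set.empty : PySem.Set String))
  -- second loop: remaining items in dict order
  let ordered := d.items.foldl
    (fun acc p => if PySem.Set.contains st.2 p.1 then acc else acc ++ [p]) st.1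
  (PySem.Dict.ofList (PySem.List.slice ordered none (some fallback_limit))).items

-- ===== PORT B =====
def select_prompt_examples_alt (examples : List (String × String)) (profile : List (String × List String)) (fallback_limit : Int) : List (String × String) :=
  let prof := PySem.Dict.mk profile
  let d := PySem.Dict.mk examples
  let preferred := dedupe (prof.getD "page_types" [] ++ prof.getD "existing_pages" [])
  let n : Int := preferred.length
  let rank := (PySem.List.enumerate preferred 0).foldl
    (fun (r : PySem.Dict String Int) q => r.insert q.2 q.1) PySem.Dict.empty
  let tagged := d.items.map (fun p => (rank.getD p.1 n, p))
  let buckets := tagged.foldl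
    (fun (bs : PySem.Dict Int (List (String × String))) q => bs.modify q.1 [] (· ++ [q.2]))
    PySem.Dict.empty
  let ordered := (PySem.List.pyRange 0 (n + 1) 1).flatMap (fun i => buckets.getD i [])
  (PySem.Dict.ofList (PySem.List.slice ordered none (some fallback_limit))).items

-- ===== PRECONDITION & SPEC =====
-- Pre_ requires the example keys to be pairwise distinct: `examples` models a Python
-- dict, whose keys are necessarily unique, so this excludes no input A is ever run on.
def Pre_select_prompt_examples (examples : List (String × String)) (profile : List (String × List String)) (fallback_limit : Int) : Prop :=
  (examples.map Prod.fst).Nodup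
instance (examples : List (String × String)) (profile : List (String × List String)) (fallback_limit : Int) : Decidable (Pre_select_prompt_examples examples profile fallback_limit) := by unfold Pre_select_prompt_examples; infer_instance

def pvWitness_select_prompt_examples : (List (String × String)) × (List (String × List String)) × Int :=
  ([("home", "H"), ("about", "A")], [("page_types", ["about", "  about "])], 3)

def Spec_select_prompt_examples (examples : List (String × String)) (profile : List (String × List String)) (fallback_limit : Int) (out : List (String × String)) : Prop := out = select_prompt_examples_alt examples profile fallback_limit
instance (examples : List (String × String)) (profile : List (String × List String)) (fallback_limit : Int) (out : List (String × String)) : Decidable (Spec_select_prompt_examples examples profile fallback_limit out) := by unfold Spec_select_prompt_examples; infer_instance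

-- ===== CLAIM (what is proved, stated in full; the proofs are below) =====
def Claim_equal_select_prompt_examples : Prop := ∀ (examples : List (String × String)) (profile : List (String × List String)) (fallback_limit : Int), Dom_select_prompt_examples examples profile fallback_limit → Pre_select_prompt_examples examples profile fallback_limit → Spec_select_prompt_examples examples profile fallback_limit (select_prompt_examples examples profile fallback_limit)

-- ===== LEMMAS AND PROOFS =====

-- dedupe's loop step, named for the proofs (definitionally dedupe's lambda)
def dstep (acc : PySem.Set String × List String) (item : String) : PySem.Set String × List String :=
  let value := PySem.Str.strip item
  if value = "" then acc
  else
    let marker := PySem.Str.lower value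
    if PySem.Set.contains acc.1 marker then acc
    else (PySem.Set.add acc.1 marker, acc.2 ++ [value])

theorem dedupe_eq (items : List String) :
    dedupe items = (items.foldl dstep ((PySem.Set.empty : PySem.Set String), ([] : List String))).2 := rfl

theorem dstep_empty {item : String} (acc : PySem.Set String × List String)
    (h : PySem.Str.strip item = "") : dstep acc item = acc := by
  simp [dstep, h]

theorem dstep_seen {item : String} (acc : PySem.Set String × List String)
    (h1 : ¬ PySem.Str.strip item = "") (h2 : PySem.Str.lower (PySem.Str.strip item) ∈ acc.1) :
    dstep acc item = acc := by
  simp [dstep, h1, h2]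

theorem dstep_new {item : String} (acc : PySem.Set String × List String)
    (h1 : ¬ PySem.Str.strip item = "") (h2 : PySem.Str.lower (PySem.Str.strip item) ∉ acc.1) :
    dstep acc item
      = (acc.1.add (PySem.Str.lower (PySem.Str.strip item)),
         acc.2 ++ [PySem.Str.strip item]) := by
  simp [dstep, h1, h2]

-- invariant of dedupe's loop: every collected value's lowering is in `seen`,
-- and the collected lowerings are pairwise distinct
theorem dedupe_aux (items : List String) :
    ∀ (seen : PySem.Set String) (ordered : List String),
      (∀ v ∈ ordered, PySem.Str.lower v ∈ seen) →
      (ordered.map PySem.Str.lower).Nodup →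
      (∀ v ∈ (items.foldl dstep (seen, ordered)).2,
          PySem.Str.lower v ∈ (items.foldl dstep (seen, ordered)).1) ∧
      ((items.foldl dstep (seen, ordered)).2.map PySem.Str.lower).Nodup := by
  induction items with
  | nil => intro seen ordered h1 h2; exact ⟨h1, h2⟩
  | cons item rest ih =>
    intro seen ordered h1 h2
    simp only [List.foldl_cons]
    by_cases hv : PySem.Str.strip item = ""
    · rw [dstep_empty _ hv]; exact ih seen ordered h1 h2
    · by_cases hm : PySem.Str.lower (PySem.Str.strip item) ∈ seen
      · rw [dstep_seen _ hv hm]; exact ih seen ordered h1 h2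
      · rw [dstep_new _ hv hm]
        refine ih _ _ ?_ ?_
        · intro v hvmem
          rcases List.mem_append.mp hvmem with h | h
          · exact (PySem.Set.mem_add _ _ _).mpr (Or.inl (h1 v h))
          · simp only [List.mem_singleton] at h
            subst h
            exact (PySem.Set.mem_add _ _ _).mpr (Or.inr rfl)
        · rw [List.map_append, List.map_singleton]
          refine List.Nodup.append h2 (List.nodup_singleton _) ?_
          intro x hx hx'
          simp only [List.mem_singleton] at hx'
          subst hx'
          rcases List.mem_map.mp hx with ⟨v, hvm, hveq⟩
          exact hm (hveq ▸ h1 v hvm)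

theorem dedupe_nodup (items : List String) : (dedupe items).Nodup := by
  rw [dedupe_eq]
  have h := (dedupe_aux items PySem.Set.empty [] (by intro v h; cases h) (by simp)).2
  exact h.of_map _

-- the rank dict built from `enumerate preferred` looks up the index of a key
theorem rank_getD (P : List String) (hP : P.Nodup) (k : String) (dflt : Int) :
    ((PySem.List.enumerate P 0).foldl
      (fun (r : PySem.Dict String Int) q => r.insert q.2 q.1) PySem.Dict.empty).getD k dflt
    = if k ∈ P then (P.idxOf k : Int) else dflt := by
  induction P using List.reverseRecOn with
  | nil => simp [PySem.List.enumerate]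
  | append_singleton P x ih =>
    have hxP : x ∉ P := by
      intro hmem
      exact (List.nodup_append.mp hP).2.2 x hmem x (List.mem_singleton.mpr rfl) rfl
    have hP' : P.Nodup := (List.nodup_append.mp hP).1
    rw [PySem.List.enumerate_append]
    rw [List.foldl_append]
    have hsing : PySem.List.enumerate [x] (0 + (P.length : Int)) = [((P.length : Int), x)] := by
      simp [PySem.List.enumerate]
    rw [hsing]
    simp only [List.foldl_cons, List.foldl_nil]
    rw [PySem.Dict.getD_insert]
    by_cases hk : k = x
    · subst hk
      have : (P ++ [k]).idxOf k = P.length := by simp [List.idxOf_append, hxP]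
      simp [this]
    · rw [if_neg hk, ih hP']
      by_cases hkP : k ∈ P
      · have h1 : k ∈ P ++ [x] := List.mem_append.mpr (Or.inl hkP)
        have h2 : (P ++ [x]).idxOf k = P.idxOf k := List.idxOf_append_of_mem hkP
        simp [hkP, h1, h2]
      · have h1 : k ∉ P ++ [x] := by
          intro h; rcases List.mem_append.mp h with h | h
          · exact hkP h
          · simp only [List.mem_singleton] at h; exact hk h
        simp [hkP, h1]

-- A's first loop: collects preferred∩examples in order; `seen` collects exactly those keys
theorem loop1_spec (d : PySem.Dict String String) (P : List String) :
    ∀ (acc : List (String × String)) (seen : PySem.Set String),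
      (P.foldl (fun (acc : List (String × String) × PySem.Set String) key =>
          if d.contains key then (acc.1 ++ [(key, d.getD key "")], acc.2.add key) else acc)
        (acc, seen)).1
        = acc ++ (P.filter (fun k => d.contains k)).map (fun k => (k, d.getD k "")) ∧
      ∀ x, x ∈ (P.foldl (fun (acc : List (String × String) × PySem.Set String) key =>
          if d.contains key then (acc.1 ++ [(key, d.getD key "")], acc.2.add key) else acc)
        (acc, seen)).2 ↔ x ∈ seen ∨ (x ∈ P ∧ d.contains x = true) := by
  induction P with
  | nil => intro acc seen; simp
  | cons p rest ih =>
    intro acc seen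
    simp only [List.foldl_cons]
    by_cases hc : d.contains p = true
    · rw [if_pos hc]
      rcases ih (acc ++ [(p, d.getD p "")]) (seen.add p) with ⟨ha, hs⟩
      constructor
      · rw [ha]; simp [hc]
      · intro x
        rw [hs x, PySem.Set.mem_add]
        constructor
        · rintro ((h | h) | h)
          · exact Or.inl h
          · exact Or.inr ⟨by simp [h], h ▸ hc⟩
          · exact Or.inr ⟨List.mem_cons_of_mem _ h.1, h.2⟩
        · rintro (h | ⟨hm, hcx⟩)
          · exact Or.inl (Or.inl h)
          · rcases List.mem_cons.mp hm with h | h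
            · exact Or.inl (Or.inr h)
            · exact Or.inr ⟨h, hcx⟩
    · rw [if_neg hc]
      rcases ih acc seen with ⟨ha, hs⟩
      constructor
      · rw [ha]; simp [hc]
      · intro x
        rw [hs x]
        constructor
        · rintro (h | h)
          · exact Or.inl h
          · exact Or.inr ⟨List.mem_cons_of_mem _ h.1, h.2⟩
        · rintro (h | ⟨hm, hcx⟩)
          · exact Or.inl h
          · rcases List.mem_cons.mp hm with h | h
            · subst h; exact absurd hcx hc
            · exact Or.inr ⟨h, hcx⟩

-- A's second loop as a filter-append (via PySem.List.foldl_append_if)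
theorem loop2_eq (s : PySem.Set String) (E : List (String × String)) (acc : List (String × String)) :
    E.foldl (fun acc p => if PySem.Set.contains s p.1 then acc else acc ++ [p]) acc
      = acc ++ E.filter (fun p => !PySem.Set.contains s p.1) := by
  have hfun : (fun (acc : List (String × String)) p =>
      if PySem.Set.contains s p.1 then acc else acc ++ [p])
      = (fun acc p => if (!PySem.Set.contains s p.1) = true then acc ++ [id p] else acc) := by
    funext acc p
    cases h : PySem.Set.contains s p.1 <;> simp
  rw [hfun, PySem.List.foldl_append_if]
  simp

-- with distinct keys, all items matching one key form the singleton dict entry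
theorem filter_single (E : List (String × String)) (hE : (E.map Prod.fst).Nodup) (k : String) :
    E.filter (fun p => p.1 == k)
      = if (PySem.Dict.mk E).contains k then [(k, (PySem.Dict.mk E).getD k "")] else [] := by
  induction E with
  | nil => simp [PySem.Dict.contains]
  | cons p rest ih =>
    simp only [List.map_cons, List.nodup_cons] at hE
    by_cases hk : p.1 = k
    · have hknot : k ∉ rest.map Prod.fst := hk ▸ hE.1
      have hrest : rest.filter (fun q => q.1 == k) = [] := by
        rw [List.filter_eq_nil_iff]
        intro q hq hq'
        exact hknot (List.mem_map.mpr ⟨q, hq, by simpa using hq'⟩)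
      have hcon : (PySem.Dict.mk (p :: rest)).contains k = true := by
        rw [PySem.Dict.contains_eq_decide_mem_keys]
        simp [PySem.Dict.keys, hk]
      have hget : (PySem.Dict.mk (p :: rest)).getD k "" = p.2 := by
        rw [PySem.Dict.getD_eq_get?_getD, PySem.Dict.get?_mk_cons]
        simp [hk]
      rw [List.filter_cons_of_pos (by simp [hk]), hrest, hcon, if_pos rfl, hget]
      have : p = (k, p.2) := by rw [← hk]
      rw [this]
    · have hk' : ¬k = p.1 := fun h => hk h.symm
      have hcon : (PySem.Dict.mk (p :: rest)).contains k = (PySem.Dict.mk rest).contains k := by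
        rw [PySem.Dict.contains_eq_decide_mem_keys, PySem.Dict.contains_eq_decide_mem_keys]
        simp [PySem.Dict.keys, hk']
      have hget : (PySem.Dict.mk (p :: rest)).getD k "" = (PySem.Dict.mk rest).getD k "" := by
        rw [PySem.Dict.getD_eq_get?_getD, PySem.Dict.getD_eq_get?_getD, PySem.Dict.get?_mk_cons]
        simp [hk]
      rw [List.filter_cons_of_neg (by simp [hk]), ih hE.2, hcon, hget]

-- flatMap over range-of-indices equals flatMap over the list
theorem flatMap_range_getD (l : List String) (g : String → List (String × String)) :
    (List.range l.length).flatMap (fun i => g (l.getD i "")) = l.flatMap g := by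
  induction l with
  | nil => simp
  | cons a l ih =>
    rw [List.length_cons, List.range_succ_eq_map]
    simp only [List.flatMap_cons, List.flatMap_map, Nat.succ_eq_add_one,
      List.getD_cons_zero, List.getD_cons_succ]
    rw [ih]

-- summing singleton buckets over the preferred keys gives A's head list
theorem flatMap_buckets (E : List (String × String)) (hE : (E.map Prod.fst).Nodup) (P : List String) :
    P.flatMap (fun k => E.filter (fun p => p.1 == k))
      = (P.filter (fun k => (PySem.Dict.mk E).contains k)).map
          (fun k => (k, (PySem.Dict.mk E).getD k "")) := by
  induction P with
  | nil => simp
  | cons k rest ih =>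
    rw [List.flatMap_cons, filter_single E hE k, ih]
    by_cases hc : (PySem.Dict.mk E).contains k = true
    · rw [if_pos hc, List.filter_cons_of_pos hc, List.map_cons, List.singleton_append]
    · rw [if_neg hc, List.filter_cons_of_neg (by simpa using hc), List.nil_append]

-- every key of the example list is contained in its dict
theorem mem_contains (E : List (String × String)) :
    ∀ p ∈ E, (PySem.Dict.mk E).contains p.1 = true := by
  intro p hp
  rw [PySem.Dict.contains_eq_decide_mem_keys]
  simp only [PySem.Dict.keys_mk, decide_eq_true_eq]
  exact List.mem_map.mpr ⟨p, hp, rfl⟩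

-- rank lookup with the sentinel default, as a boolean comparison with the sentinel
theorem rho_sentinel_beq (P : List String) (k : String) :
    ((if k ∈ P then (P.idxOf k : Int) else (P.length : Int)) == (P.length : Int))
      = !decide (k ∈ P) := by
  by_cases h : k ∈ P
  · have hlt := List.idxOf_lt_length_of_mem h
    simp only [h, if_pos, decide_true, Bool.not_true, beq_eq_false_iff_ne, ne_eq]
    intro he
    omega
  · simp [h]

-- rank lookup compared with an index below the sentinel
theorem rho_idx_beq (P : List String) (hP : P.Nodup) (j : Nat) (hj : j < P.length) (k : String) :
    ((if k ∈ P then (P.idxOf k : Int) else (P.length : Int)) == (j : Int))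
      = (k == P.getD j "") := by
  have hgd : P.getD j "" = P[j] := List.getD_eq_getElem P "" hj
  by_cases h : k ∈ P
  · have hlt := List.idxOf_lt_length_of_mem h
    rw [if_pos h, hgd]
    by_cases he : P.idxOf k = j
    · have hkj : k = P[j] := by subst he; exact (List.getElem_idxOf hlt).symm
      rw [beq_iff_eq.mpr (by omega), beq_iff_eq.mpr hkj]
    · have hne : ¬((P.idxOf k : Int) = (j : Int)) := by omega
      have hkne : ¬(k = P[j]) := by
        intro hk
        apply he
        refine (List.Nodup.getElem_inj_iff hP (hi := hlt) (hj := hj)).mp ?_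
        rw [List.getElem_idxOf hlt, hk]
      rw [beq_eq_false_iff_ne.mpr hne, beq_eq_false_iff_ne.mpr hkne]
  · have hkne : ¬(k = P.getD j "") := by
      intro hk
      exact h (hk ▸ (hgd ▸ List.getElem_mem hj))
    have hne : ¬(((P.length : Int)) = (j : Int)) := by omega
    rw [if_neg h, beq_eq_false_iff_ne.mpr hne, beq_eq_false_iff_ne.mpr hkne]

-- the central equality: A's two loops produce exactly B's concatenated buckets
theorem ordered_eq (E : List (String × String)) (hE : (E.map Prod.fst).Nodup)
    (P : List String) (hP : P.Nodup) :
    (E.foldl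
      (fun acc p => if PySem.Set.contains
          (P.foldl (fun (acc : List (String × String) × PySem.Set String) key =>
              if (PySem.Dict.mk E).contains key
              then (acc.1 ++ [(key, (PySem.Dict.mk E).getD key "")], acc.2.add key)
              else acc)
            (([] : List (String × String)), (PySem.Set.empty : PySem.Set String))).2 p.1
        then acc else acc ++ [p])
      (P.foldl (fun (acc : List (String × String) × PySem.Set String) key =>
          if (PySem.Dict.mk E).contains key
          then (acc.1 ++ [(key, (PySem.Dict.mk E).getD key "")], acc.2.add key)
          else acc)
        (([] : List (String × String)), (PySem.Set.empty : PySem.Set String))).1)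
    =
    (PySem.List.pyRange 0 ((P.length : Int) + 1) 1).flatMap
      (fun i =>
        ((E.map (fun p =>
            (((PySem.List.enumerate P 0).foldl
                (fun (r : PySem.Dict String Int) q => r.insert q.2 q.1)
                PySem.Dict.empty).getD p.1 (P.length : Int), p))).foldl
          (fun (bs : PySem.Dict Int (List (String × String))) q =>
            bs.modify q.1 [] (· ++ [q.2]))
          PySem.Dict.empty).getD i []) := by
  obtain ⟨h1, h2⟩ := loop1_spec (PySem.Dict.mk E) P
    (([] : List (String × String))) (PySem.Set.empty : PySem.Set String)
  -- A's side
  rw [loop2_eq, h1, List.nil_append]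
  have htailA : E.filter (fun p => !PySem.Set.contains
      (P.foldl (fun (acc : List (String × String) × PySem.Set String) key =>
          if (PySem.Dict.mk E).contains key
          then (acc.1 ++ [(key, (PySem.Dict.mk E).getD key "")], acc.2.add key)
          else acc)
        (([] : List (String × String)), (PySem.Set.empty : PySem.Set String))).2 p.1)
      = E.filter (fun p => !decide (p.1 ∈ P)) := by
    refine List.filter_congr ?_
    intro p hp
    rw [PySem.Set.contains_eq_decide]
    have : p.1 ∈ (P.foldl (fun (acc : List (String × String) × PySem.Set String) key =>
        if (PySem.Dict.mk E).contains key
        then (acc.1 ++ [(key, (PySem.Dict.mk E).getD key "")], acc.2.add key)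
        else acc)
      (([] : List (String × String)), (PySem.Set.empty : PySem.Set String))).2 ↔ p.1 ∈ P := by
      rw [h2 p.1]
      constructor
      · rintro (h | h)
        · cases h
        · exact h.1
      · intro h
        exact Or.inr ⟨h, mem_contains E p hp⟩
    exact congrArg (fun b => !b) (decide_eq_decide.mpr this)
  rw [htailA]
  -- B's side: each bucket is a filter of E
  have hrank : ∀ (k : String), ((PySem.List.enumerate P 0).foldl
      (fun (r : PySem.Dict String Int) q => r.insert q.2 q.1) PySem.Dict.empty).getD k (P.length : Int)
      = if k ∈ P then (P.idxOf k : Int) else (P.length : Int) := fun k => rank_getD P hP k _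
  have hbucket : ∀ (i : Int),
      ((E.map (fun p =>
          (((PySem.List.enumerate P 0).foldl
              (fun (r : PySem.Dict String Int) q => r.insert q.2 q.1)
              PySem.Dict.empty).getD p.1 (P.length : Int), p))).foldl
        (fun (bs : PySem.Dict Int (List (String × String))) q =>
          bs.modify q.1 [] (· ++ [q.2]))
        PySem.Dict.empty).getD i []
      = E.filter (fun p =>
          (if p.1 ∈ P then (P.idxOf p.1 : Int) else (P.length : Int)) == i) := by
    intro i
    rw [PySem.Dict.getD_foldl_modify_append, PySem.Dict.getD_empty, List.nil_append]
    rw [List.filter_map]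
    rw [List.map_map]
    have hcomp : ((fun (x : Int × (String × String)) => x.2) ∘
        (fun p => (((PySem.List.enumerate P 0).foldl
            (fun (r : PySem.Dict String Int) q => r.insert q.2 q.1)
            PySem.Dict.empty).getD p.1 (P.length : Int), p))) = id := by
      funext p; rfl
    rw [hcomp, List.map_id]
    refine List.filter_congr ?_
    intro p _
    simp only [Function.comp_apply, hrank p.1]
  -- unfold the range into indices 0..P.length
  rw [PySem.List.pyRange_one]
  have hlen : (((P.length : Int) + 1 - 0).toNat) = P.length + 1 := by omega
  rw [hlen, List.flatMap_map, List.range_succ, List.flatMap_append]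
  simp only [List.flatMap_cons, List.flatMap_nil, List.append_nil]
  rw [hbucket]
  have htailB : E.filter (fun p =>
      (if p.1 ∈ P then (P.idxOf p.1 : Int) else (P.length : Int)) == ((0 : Int) + (P.length : Nat)))
      = E.filter (fun p => !decide (p.1 ∈ P)) := by
    refine List.filter_congr ?_
    intro p _
    have : ((0 : Int) + (P.length : Nat)) = (P.length : Int) := by omega
    rw [this, rho_sentinel_beq]
  rw [htailB]
  -- the head: buckets 0..P.length-1 concatenated are A's preferred scan
  have hhead : (List.range P.length).flatMap (fun j =>
      ((E.map (fun p =>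
          (((PySem.List.enumerate P 0).foldl
              (fun (r : PySem.Dict String Int) q => r.insert q.2 q.1)
              PySem.Dict.empty).getD p.1 (P.length : Int), p))).foldl
        (fun (bs : PySem.Dict Int (List (String × String))) q =>
          bs.modify q.1 [] (· ++ [q.2]))
        PySem.Dict.empty).getD ((0 : Int) + (j : Nat)) [])
      = (P.filter (fun k => (PySem.Dict.mk E).contains k)).map
          (fun k => (k, (PySem.Dict.mk E).getD k "")) := by
    have hmapc : ∀ j ∈ List.range P.length,
        ((E.map (fun p =>
            (((PySem.List.enumerate P 0).foldl
                (fun (r : PySem.Dict String Int) q => r.insert q.2 q.1)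
                PySem.Dict.empty).getD p.1 (P.length : Int), p))).foldl
          (fun (bs : PySem.Dict Int (List (String × String))) q =>
            bs.modify q.1 [] (· ++ [q.2]))
          PySem.Dict.empty).getD ((0 : Int) + (j : Nat)) []
        = E.filter (fun p => p.1 == P.getD j "") := by
      intro j hj
      have hjlt : j < P.length := List.mem_range.mp hj
      have hz : ((0 : Int) + (j : Nat)) = (j : Int) := by omega
      rw [hz, hbucket]
      refine List.filter_congr ?_
      intro p _
      exact rho_idx_beq P hP j hjlt p.1
    calc (List.range P.length).flatMap (fun j =>
          ((E.map (fun p =>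
              (((PySem.List.enumerate P 0).foldl
                  (fun (r : PySem.Dict String Int) q => r.insert q.2 q.1)
                  PySem.Dict.empty).getD p.1 (P.length : Int), p))).foldl
            (fun (bs : PySem.Dict Int (List (String × String))) q =>
              bs.modify q.1 [] (· ++ [q.2]))
            PySem.Dict.empty).getD ((0 : Int) + (j : Nat)) [])
        = (List.range P.length).flatMap (fun j => E.filter (fun p => p.1 == P.getD j "")) := by
          rw [List.flatMap, List.flatMap]
          exact congrArg List.flatten (List.map_congr_left hmapc)
      _ = P.flatMap (fun k => E.filter (fun p => p.1 == k)) :=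
          flatMap_range_getD P (fun k => E.filter (fun p => p.1 == k))
      _ = (P.filter (fun k => (PySem.Dict.mk E).contains k)).map
            (fun k => (k, (PySem.Dict.mk E).getD k "")) := flatMap_buckets E hE P
  rw [hhead]

-- ===== VERDICT (by name: the statement is the Claim_ definition above) =====
theorem select_prompt_examples_spec : Claim_equal_select_prompt_examples := by
  intro examples profile fallback_limit _dom hpre
  unfold Spec_select_prompt_examples
  have h := ordered_eq examples hpre
    (dedupe ((PySem.Dict.mk profile).getD "page_types" []
      ++ (PySem.Dict.mk profile).getD "existing_pages" []))
    (dedupe_nodup _)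
  simp only [select_prompt_examples, select_prompt_examples_alt]
  exact congrArg
    (fun l => (PySem.Dict.ofList (PySem.List.slice l none (some fallback_limit))).items) h
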